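-- pv_equiv track=rewrite | github.com/chrxs-si/connectFour | test.py | board_to_move_sequence
-- ===== SOURCE A (Python) =====
-- COLUMNS = 7
--
-- def board_to_move_sequence(board):
--     moves = []
--     temp_board = [[] for _ in range(COLUMNS)]
--     total_moves = sum(len(col) for col in board)
--     for i in range(total_moves):
--         for c in range(COLUMNS):
--             if len(temp_board[c]) < len(board[c]):
--                 temp_board[c].append(board[c][len(temp_board[c])])
--                 moves.append(c)
--                 break
--     return moves
-- ===== SOURCE B (Python) =====
-- COLUMNS = 7
--
-- def board_to_move_sequence(board):
--     # Direct reconstruction: the move sequence is just each column index,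
--     # repeated once per piece already in that column (first COLUMNS columns only).
--     return [c for c, col in enumerate(board[:COLUMNS]) for _ in col]
-- ===== Notes on version B (the rewrite author's own statement) =====
-- stated objective: faster
-- what changed: B drops A's whole move-by-move simulation (temp_board, total_moves counter, restart scans with break, element indexing) and emits each of the first 7 column indices once per piece already in that column, in one comprehension.
import Mathlib
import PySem

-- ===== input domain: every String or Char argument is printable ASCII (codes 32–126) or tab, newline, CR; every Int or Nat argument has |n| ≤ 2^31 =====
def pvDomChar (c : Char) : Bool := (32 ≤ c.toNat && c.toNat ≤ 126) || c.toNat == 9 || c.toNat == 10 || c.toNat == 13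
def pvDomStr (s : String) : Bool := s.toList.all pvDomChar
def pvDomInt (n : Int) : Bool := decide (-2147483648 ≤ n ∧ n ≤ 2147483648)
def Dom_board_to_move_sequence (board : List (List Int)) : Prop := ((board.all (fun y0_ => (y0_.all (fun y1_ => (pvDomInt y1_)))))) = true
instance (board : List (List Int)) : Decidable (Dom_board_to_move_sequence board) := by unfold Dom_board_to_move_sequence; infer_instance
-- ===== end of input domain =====

-- B replaces A's move-by-move simulation (temp_board + restart scans) by emitting each
-- column index once per piece directly; objective: simpler (and faster: O(n) vs O(n^2)-ish scans).

-- ===== PORT A =====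
-- inner `for c in range(COLUMNS): if …: …; break` — scans the listed column indices,
-- stops at the first unfilled column (board[c]/temp_board[c] accesses are in range
-- whenever this code runs in A, so getD transliterates them exactly there).
def pvScanA (board : List (List Int)) (temp : List (List Int)) (moves : List Int) :
    List Nat → List (List Int) × List Int
  | [] => (temp, moves)
  | c :: rest =>
    let tc := temp.getD c []
    let bc := board.getD c []
    if tc.length < bc.length then
      (temp.set c (tc ++ [bc.getD tc.length 0]), moves ++ [(c : Int)])
    else pvScanA board temp moves rest

def board_to_move_sequence (board : List (List Int)) : List Int :=
  let total := (board.map List.length).sum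
  ((List.range total).foldl
      (fun tm _ => pvScanA board tm.1 tm.2 (List.range 7))
      (List.replicate 7 ([] : List Int), ([] : List Int))).2

-- ===== PORT B =====
-- Source B: [c for c, col in enumerate(board[:COLUMNS]) for _ in col]
def board_to_move_sequence_alt (board : List (List Int)) : List Int :=
  (PySem.List.enumerate (PySem.List.slice board none (some 7))).flatMap
    (fun p => p.2.map (fun _ => p.1))

-- ===== PRECONDITION & SPEC =====
def Spec_board_to_move_sequence (board : List (List Int)) (out : List Int) : Prop := out = board_to_move_sequence_alt board
instance (board : List (List Int)) (out : List Int) : Decidable (Spec_board_to_move_sequence board out) := by unfold Spec_board_to_move_sequence; infer_instance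

-- ===== CLAIM (what is proved, stated in full; the proofs are below) =====
def Claim_equal_board_to_move_sequence : Prop := ∀ (board : List (List Int)), Dom_board_to_move_sequence board → Spec_board_to_move_sequence board (board_to_move_sequence board)

-- ===== LEMMAS AND PROOFS =====

-- closed-form description of A's simulation state after n placed pieces
def pvCap (board : List (List Int)) (c : Nat) : Nat := (board.getD c []).length
def pvPfx (board : List (List Int)) (c : Nat) : Nat := ((List.range c).map (pvCap board)).sum
def pvHgt (board : List (List Int)) (n c : Nat) : Nat := min (pvCap board c) (n - pvPfx board c)
def pvTempN (board : List (List Int)) (n : Nat) : List (List Int) :=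
  (List.range 7).map (fun c => (board.getD c []).take (pvHgt board n c))
def pvMovesN (board : List (List Int)) (n : Nat) : List Int :=
  (List.range 7).flatMap (fun c => List.replicate (pvHgt board n c) (c : Int))

lemma pvPfx_succ (board : List (List Int)) (c : Nat) :
    pvPfx board (c + 1) = pvPfx board c + pvCap board c := by
  simp [pvPfx, List.range_succ]

lemma pvPfx_mono (board : List (List Int)) {c d : Nat} (h : c ≤ d) :
    pvPfx board c ≤ pvPfx board d := by
  obtain ⟨e, rfl⟩ := Nat.le.dest h
  induction e with
  | zero => simp
  | succ e ih =>
    have h1 : c + (e + 1) = (c + e) + 1 := by omega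
    rw [h1, pvPfx_succ]
    omega

lemma pvHgt_le_cap (board : List (List Int)) (n c : Nat) : pvHgt board n c ≤ pvCap board c :=
  Nat.min_le_left _ _

lemma pvTempN_getD (board : List (List Int)) (n c : Nat) (hc : c < 7) :
    (pvTempN board n).getD c [] = (board.getD c []).take (pvHgt board n c) := by
  simp [pvTempN, List.getD_eq_getElem?_getD, hc]

lemma pvTempN_getD_length (board : List (List Int)) (n c : Nat) (hc : c < 7) :
    ((pvTempN board n).getD c []).length = pvHgt board n c := by
  rw [pvTempN_getD board n c hc, List.length_take]
  have := pvHgt_le_cap board n c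
  simp [pvCap] at this ⊢
  omega

lemma pvScanA_none (board temp : List (List Int)) (moves : List Int) :
    ∀ (m k : Nat),
      (∀ c, c ∈ List.range' k m → ¬ ((temp.getD c []).length < (board.getD c []).length)) →
      pvScanA board temp moves (List.range' k m) = (temp, moves) := by
  intro m
  induction m with
  | zero => intro k _; simp [pvScanA]
  | succ m ih =>
    intro k hfull
    rw [List.range'_succ]
    have hk : ¬ ((temp.getD k []).length < (board.getD k []).length) :=
      hfull k (by simp [List.range'_succ])
    simp only [pvScanA, hk, if_false]
    exact ih (k + 1) (fun c hc => hfull c (by rw [List.range'_succ]; exact List.mem_cons_of_mem _ hc))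

lemma pvScanA_find (board temp : List (List Int)) (moves : List Int) (j : Nat) :
    ∀ (m k : Nat), k ≤ j → j < k + m →
      (∀ c, k ≤ c → c < j → ¬ ((temp.getD c []).length < (board.getD c []).length)) →
      ((temp.getD j []).length < (board.getD j []).length) →
      pvScanA board temp moves (List.range' k m) =
        (temp.set j ((temp.getD j []) ++ [(board.getD j []).getD (temp.getD j []).length 0]),
         moves ++ [(j : Int)]) := by
  intro m
  induction m with
  | zero => intro k h1 h2 _ _; omega
  | succ m ih =>
    intro k h1 h2 hfull hj
    rw [List.range'_succ]
    rcases Nat.eq_or_lt_of_le h1 with rfl | hlt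
    · simp only [pvScanA, hj, if_true]
    · have hk : ¬ ((temp.getD k []).length < (board.getD k []).length) :=
        hfull k le_rfl hlt
      simp only [pvScanA, hk, if_false]
      exact ih (k + 1) hlt (by omega) (fun c hc1 hc2 => hfull c (by omega) hc2) hj

lemma pvSet_map_range {α : Type} (f g : Nat → α) (mN j : Nat)
    (hfg : ∀ c, c < mN → c ≠ j → f c = g c) (v : α) (hv : v = g j) :
    ((List.range mN).map f).set j v = (List.range mN).map g := by
  apply List.ext_getElem
  · simp
  · intro i h1 h2
    simp only [List.getElem_set, List.getElem_map, List.getElem_range]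
    simp only [List.length_set, List.length_map, List.length_range] at h1
    by_cases hij : j = i
    · subst hij; simp [hv]
    · simp [hij]
      exact hfg i h1 (fun h => hij h.symm)

lemma pvStep (board : List (List Int)) (n : Nat) :
    pvScanA board (pvTempN board n) (pvMovesN board n) (List.range 7) =
      (pvTempN board (n + 1), pvMovesN board (n + 1)) := by
  by_cases hbig : pvPfx board 7 ≤ n
  · -- all seven columns already full; the scan finds nothing and the state is unchanged
    have hfull : ∀ c, c < 7 → pvHgt board n c = pvCap board c := by
      intro c hc
      have h1 : pvPfx board (c + 1) ≤ n := le_trans (pvPfx_mono board (by omega)) hbig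
      rw [pvPfx_succ] at h1
      simp [pvHgt]; omega
    have hfull' : ∀ c, c < 7 → pvHgt board (n + 1) c = pvCap board c := by
      intro c hc
      have h1 : pvPfx board (c + 1) ≤ n := le_trans (pvPfx_mono board (by omega)) hbig
      rw [pvPfx_succ] at h1
      simp [pvHgt]; omega
    have heq : pvTempN board (n + 1) = pvTempN board n := by
      unfold pvTempN
      apply List.map_congr_left
      intro c hc
      simp only [List.mem_range] at hc
      rw [hfull c hc, hfull' c hc]
    have heq2 : pvMovesN board (n + 1) = pvMovesN board n := by
      unfold pvMovesN
      apply List.flatMap_congr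
      intro c hc
      simp only [List.mem_range] at hc
      rw [hfull c hc, hfull' c hc]
    rw [heq, heq2, List.range_eq_range']
    apply pvScanA_none
    intro c hc
    have hc7 : c < 7 := by have := List.mem_range'_1.mp hc; omega
    rw [pvTempN_getD_length board n c hc7, hfull c hc7]
    simp [pvCap]
  · -- n < pvPfx 7 : the scan stops at the least not-yet-full column j
    rw [Nat.not_le] at hbig
    have hex : ∃ c, n < pvPfx board (c + 1) := ⟨6, hbig⟩
    obtain ⟨j, hj7, hjP, hjmin⟩ : ∃ j, j < 7 ∧ n < pvPfx board (j + 1) ∧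
        ∀ c, c < j → pvPfx board (c + 1) ≤ n := by
      refine ⟨Nat.find hex, ?_, Nat.find_spec hex, fun c hc => ?_⟩
      · have h6 : Nat.find hex ≤ 6 := Nat.find_min' hex (show n < pvPfx board (6 + 1) from hbig)
        omega
      · have := Nat.find_min hex hc
        omega
    have hpj : pvPfx board j ≤ n := by
      cases j with
      | zero => simp [pvPfx]
      | succ j' => exact hjmin j' (by omega)
    have hjlt : pvHgt board n j < pvCap board j := by
      rw [pvPfx_succ] at hjP
      simp [pvHgt]; omega
    have hhgtj : pvHgt board n j = n - pvPfx board j := by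
      rw [pvPfx_succ] at hjP
      simp [pvHgt]; omega
    have hcond : ((pvTempN board n).getD j []).length < (board.getD j []).length := by
      rw [pvTempN_getD_length board n j hj7]
      simpa [pvCap] using hjlt
    rw [List.range_eq_range']
    rw [pvScanA_find board (pvTempN board n) (pvMovesN board n) j 7 0 (by omega) (by omega)
      (fun c hc1 hc2 => by
        rw [pvTempN_getD_length board n c (by omega)]
        have h1 : pvPfx board (c + 1) ≤ n := hjmin c hc2
        rw [pvPfx_succ] at h1
        show ¬ pvHgt board n c < pvCap board c
        simp only [pvHgt, Nat.not_lt]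
        omega) hcond]
    -- heights: j increments, others unchanged
    have hgt_succ : ∀ c, c < 7 → c ≠ j →
        pvHgt board (n + 1) c = pvHgt board n c := by
      intro c hc hne
      rcases Nat.lt_or_ge c j with hcj | hcj
      · have h1 : pvPfx board (c + 1) ≤ n := hjmin c hcj
        rw [pvPfx_succ] at h1
        simp [pvHgt]; omega
      · have hcj' : j + 1 ≤ c := by omega
        have h1 : pvPfx board (j + 1) ≤ pvPfx board c := pvPfx_mono board hcj'
        have h2 : pvPfx board c ≤ pvPfx board (c+1) := pvPfx_mono board (by omega)
        simp [pvHgt]; omega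
    have hgt_j : pvHgt board (n + 1) j = pvHgt board n j + 1 := by
      rw [pvPfx_succ] at hjP
      simp [pvHgt]; omega
    simp only [Prod.mk.injEq]
    refine ⟨?_, ?_⟩
    · -- temp component
      have hlen : pvHgt board n j < (board.getD j []).length := hjlt
      rw [pvTempN_getD board n j hj7]
      have htk : (List.take (pvHgt board n j) (board.getD j [])).length = pvHgt board n j := by
        rw [List.length_take]; omega
      rw [htk]
      unfold pvTempN
      apply pvSet_map_range _ _ 7 j
      · intro c hc hne; rw [hgt_succ c hc hne]
      · rw [hgt_j]
        rw [List.take_add_one]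
        congr 1
        rw [List.getD_eq_getElem?_getD]
        have hlen' : pvHgt board n j < (board[j]?.getD []).length := hlen
        simp [List.getElem?_eq_getElem hlen']
    · -- moves component
      have hsplit : List.range 7 = List.range' 0 (j + 1) ++ List.range' (j + 1) (6 - j) := by
        have h : List.range' 0 (j + 1) ++ List.range' (0 + 1 * (j + 1)) (6 - j) =
            List.range' 0 ((j + 1) + (6 - j)) := List.range'_append
        rw [show 0 + 1 * (j + 1) = j + 1 by omega, show (j + 1) + (6 - j) = 7 by omega] at h
        rw [List.range_eq_range', ← h]
      have hzero : ∀ c, j + 1 ≤ c → pvHgt board n c = 0 ∧ pvHgt board (n+1) c = 0 := by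
        intro c hc
        have h1 : pvPfx board (j + 1) ≤ pvPfx board c := pvPfx_mono board hc
        constructor <;> (simp [pvHgt]; omega)
      unfold pvMovesN
      rw [hsplit, List.flatMap_append, List.flatMap_append]
      have htl : ∀ (nn : Nat), (∀ c, j+1 ≤ c → pvHgt board nn c = 0) →
          (List.range' (j + 1) (6 - j)).flatMap
            (fun c => List.replicate (pvHgt board nn c) (c : Int)) = [] := by
        intro nn h
        rw [List.flatMap_eq_nil_iff]
        intro c hc
        have : j + 1 ≤ c := (List.mem_range'_1.mp hc).1
        simp [h c this]
      rw [htl n (fun c hc => (hzero c hc).1), htl (n+1) (fun c hc => (hzero c hc).2)]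
      have hhead : List.range' 0 (j + 1) = List.range' 0 j ++ [j] := by
        have h : List.range' 0 j ++ List.range' (0 + 1 * j) 1 = List.range' 0 (j + 1) :=
          List.range'_append
        rw [show 0 + 1 * j = j by omega] at h
        rw [← h, List.range'_one]
      rw [hhead, List.flatMap_append, List.flatMap_append]
      have hfront : (List.range' 0 j).flatMap (fun c => List.replicate (pvHgt board (n+1) c) (c : Int))
          = (List.range' 0 j).flatMap (fun c => List.replicate (pvHgt board n c) (c : Int)) := by
        apply List.flatMap_congr  -- may not exist; fallback below
        intro c hc
        have hcj : c < j := by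
          have := List.mem_range'_1.mp hc; omega
        rw [hgt_succ c (by omega) (by omega)]
      rw [hfront]
      simp only [List.flatMap_cons, List.flatMap_nil, List.append_nil]
      rw [hgt_j, List.replicate_succ']
      simp [List.append_assoc]

lemma pvFold (board : List (List Int)) (t : Nat) :
    (List.range t).foldl (fun tm _ => pvScanA board tm.1 tm.2 (List.range 7))
      (pvTempN board 0, pvMovesN board 0) = (pvTempN board t, pvMovesN board t) := by
  induction t with
  | zero => rfl
  | succ t ih =>
    rw [show List.range (t + 1) = List.range t ++ [t] from List.range_succ, List.foldl_append, ih]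
    simpa using pvStep board t

lemma pvTempN_zero (board : List (List Int)) :
    pvTempN board 0 = List.replicate 7 ([] : List Int) := by
  unfold pvTempN
  rw [List.eq_replicate_iff]
  constructor
  · simp
  · intro b hb
    simp only [List.mem_map, List.mem_range] at hb
    obtain ⟨c, _, rfl⟩ := hb
    simp [pvHgt]

lemma pvMovesN_zero (board : List (List Int)) : pvMovesN board 0 = [] := by
  unfold pvMovesN
  rw [List.flatMap_eq_nil_iff]
  intro c _
  simp [pvHgt]

lemma pvPfx_eq_take (board : List (List Int)) (m : Nat) :
    pvPfx board m = ((board.take m).map List.length).sum := by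
  induction m with
  | zero => simp [pvPfx]
  | succ m ih =>
    rw [pvPfx_succ, ih]
    rcases Nat.lt_or_ge m board.length with hm | hm
    · rw [List.take_add_one, List.map_append, List.sum_append]
      have hc : pvCap board m = board[m].length := by
        simp [pvCap, List.getD_eq_getElem?_getD, List.getElem?_eq_getElem hm]
      simp [List.getElem?_eq_getElem hm, hc]
    · rw [List.take_of_length_le hm, List.take_of_length_le (by omega)]
      have : pvCap board m = 0 := by
        simp [pvCap, List.getD_eq_getElem?_getD, List.getElem?_eq_none_iff.mpr hm]
      omega

lemma pvPfx_le_total (board : List (List Int)) (m : Nat) :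
    pvPfx board m ≤ (board.map List.length).sum := by
  rw [pvPfx_eq_take]
  conv_rhs => rw [← List.take_append_drop m board]
  rw [List.map_append, List.sum_append]
  omega

-- both sides reduce to this structural function
def pvCanon : List (List Int) → Int → List Int
  | [], _ => []
  | col :: rest, c => List.replicate col.length c ++ pvCanon rest (c + 1)

lemma pvB_canon (bs : List (List Int)) (k : Int) :
    (PySem.List.enumerate bs k).flatMap (fun p => p.2.map (fun _ => p.1)) = pvCanon bs k := by
  induction bs generalizing k with
  | nil => simp [PySem.List.enumerate_nil, pvCanon]
  | cons b rest ih =>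
    rw [PySem.List.enumerate_cons, List.flatMap_cons, ih, pvCanon]
    congr 1
    simp [List.map_const']

lemma pvRange_canon (bs : List (List Int)) :
    ∀ (m k : Nat), bs.length ≤ m →
      (List.range' k m).flatMap
        (fun c => List.replicate ((bs.getD (c - k) []).length) ((c : Nat) : Int))
      = pvCanon bs (k : Int) := by
  induction bs with
  | nil =>
    intro m k _
    rw [pvCanon, List.flatMap_eq_nil_iff]
    intro c _
    simp
  | cons b rest ih =>
    intro m k hm
    cases m with
    | zero => simp at hm
    | succ m =>
      rw [List.range'_succ, List.flatMap_cons]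
      have h0 : (b :: rest).getD (k - k) [] = b := by simp
      rw [h0, pvCanon]
      congr 1
      have hcg : (List.range' (k+1) m).flatMap
            (fun c => List.replicate (((b :: rest).getD (c - k) []).length) ((c : Nat) : Int))
          = (List.range' (k+1) m).flatMap
            (fun c => List.replicate ((rest.getD (c - (k+1)) []).length) ((c : Nat) : Int)) := by
        apply List.flatMap_congr
        intro c hc
        have hck : k + 1 ≤ c := (List.mem_range'_1.mp hc).1
        have : c - k = (c - (k + 1)) + 1 := by omega
        rw [this, List.getD_cons_succ]
      rw [hcg, ih m (k+1) (by simpa using hm)]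
      push_cast
      ring_nf

lemma pvSlice7 (board : List (List Int)) :
    PySem.List.slice board none (some 7) = board.take 7 := by
  have := PySem.List.slice_to_natCast board 7
  simpa using this

-- ===== VERDICT (by name: the statement is the Claim_ definition above) =====
theorem board_to_move_sequence_spec : Claim_equal_board_to_move_sequence := by
  intro board _
  unfold Spec_board_to_move_sequence board_to_move_sequence board_to_move_sequence_alt
  rw [pvSlice7, pvB_canon]
  show ((List.range ((board.map List.length).sum)).foldl
      (fun tm _ => pvScanA board tm.1 tm.2 (List.range 7))
      (List.replicate 7 ([] : List Int), ([] : List Int))).2 = pvCanon (board.take 7) 0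
  rw [← pvTempN_zero board, ← pvMovesN_zero board, pvFold]
  set total := (board.map List.length).sum with htotal
  have hfull : ∀ c, c < 7 → pvHgt board total c = pvCap board c := by
    intro c hc
    have h1 : pvPfx board (c + 1) ≤ total := pvPfx_le_total board (c + 1)
    rw [pvPfx_succ] at h1
    simp [pvHgt]; omega
  unfold pvMovesN
  have h1 : (List.range 7).flatMap (fun c => List.replicate (pvHgt board total c) (c : Int))
      = (List.range 7).flatMap
          (fun c => List.replicate (((board.take 7).getD c []).length) ((c : Nat) : Int)) := by
    apply List.flatMap_congr
    intro c hc
    simp only [List.mem_range] at hc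
    rw [hfull c hc]
    have : (board.take 7).getD c [] = board.getD c [] := by
      simp [List.getD_eq_getElem?_getD, hc]
    rw [this]
    rfl
  rw [h1, List.range_eq_range']
  exact pvRange_canon (board.take 7) 7 0 (by simp)
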